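-- pv_equiv track=rewrite | github.com/nrkumar93/parallel_search | scripts/shohin_brain/python/brain2/language/parsing.py | tokenize_aggressive
-- ===== SOURCE A (Python) =====
-- def tokenize_aggressive(symbol):
--     """ Strip a predicate name or action """
--     tokens1 = symbol.split('(')
--     tokens2 = []
--     for token in tokens1:
--         tokens2.append(token.split(','))
--     tokens3 = []
--     for tokens in tokens2:
--         for token in tokens:
--             tokens3.append(token.split('_'))
--     tokens4 = []
--     for tokens in tokens3:
--         for token in tokens:
--             tokens4.append(token.strip().strip(')'))
--     return tokens4
-- ===== SOURCE B (Python) =====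
-- def tokenize_aggressive(symbol):
--     """ Strip a predicate name or action (single-pass tokenizer) """
--     tokens = []
--     buf = ''
--     for ch in symbol:
--         if ch in '(,_':
--             tokens.append(buf)
--             buf = ''
--         else:
--             buf += ch
--     tokens.append(buf)
--     return [t.strip().strip(')') for t in tokens]
-- ===== Notes on version B (the rewrite author's own statement) =====
-- stated objective: alternative
-- what changed: Replaces the three chained split passes (on the opening parenthesis, the comma and the underscore) and the two flattening loop nests by a single character scan that maintains a token buffer and cuts it at any of the three delimiters, then strips each token once.
import Mathlib
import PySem

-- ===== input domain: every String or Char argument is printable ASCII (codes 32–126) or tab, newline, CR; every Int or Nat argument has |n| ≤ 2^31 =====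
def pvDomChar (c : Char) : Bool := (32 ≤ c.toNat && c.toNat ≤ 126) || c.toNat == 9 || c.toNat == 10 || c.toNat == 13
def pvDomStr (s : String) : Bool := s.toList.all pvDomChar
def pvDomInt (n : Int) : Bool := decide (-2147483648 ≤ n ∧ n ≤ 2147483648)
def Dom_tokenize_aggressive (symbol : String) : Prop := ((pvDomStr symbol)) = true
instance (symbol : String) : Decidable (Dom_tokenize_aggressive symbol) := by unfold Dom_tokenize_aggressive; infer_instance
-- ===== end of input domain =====

-- B replaces A's three chained split passes and flattening loops by one character scan with a token buffer (same results; fewer passes).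

-- ===== PORT A =====
-- A works on strings; we port string contents as List Char (PySem string ops are defined there) and rebuild with String.mk at the end.
def tokenize_aggressive (symbol : String) : List String :=
  let tokens1 := PySem.Chars.splitOn symbol.toList ['(']
  let tokens2 := tokens1.foldl (fun acc token => acc ++ [PySem.Chars.splitOn token [',']]) []
  let tokens3 := tokens2.foldl (fun acc tokens =>
    tokens.foldl (fun acc token => acc ++ [PySem.Chars.splitOn token ['_']]) acc) []
  let tokens4 := tokens3.foldl (fun acc tokens =>
    tokens.foldl (fun acc token =>
      acc ++ [String.mk (PySem.Chars.stripChars (PySem.Chars.strip token) [')'])]) acc) []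
  tokens4

-- ===== PORT B =====
-- single-pass scan: cut the running buffer at '(', ',' or '_'
def pvScan (buf : List Char) : List Char → List (List Char)
  | [] => [buf]
  | c :: cs => if c = '(' ∨ c = ',' ∨ c = '_' then buf :: pvScan [] cs else pvScan (buf ++ [c]) cs

def tokenize_aggressive_alt (symbol : String) : List String :=
  (pvScan [] symbol.toList).map (fun t => String.mk (PySem.Chars.stripChars (PySem.Chars.strip t) [')']))

-- ===== PRECONDITION & SPEC =====
def Spec_tokenize_aggressive (symbol : String) (out : List String) : Prop := out = tokenize_aggressive_alt symbol
instance (symbol : String) (out : List String) : Decidable (Spec_tokenize_aggressive symbol out) := by unfold Spec_tokenize_aggressive; infer_instance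

-- ===== CLAIM (what is proved, stated in full; the proofs are below) =====
def Claim_equal_tokenize_aggressive : Prop := ∀ (symbol : String), Dom_tokenize_aggressive symbol → Spec_tokenize_aggressive symbol (tokenize_aggressive symbol)

-- ===== LEMMAS AND PROOFS =====

-- prepend p to the first token of a token list
def consHead (p : List Char) : List (List Char) → List (List Char)
  | [] => [p]
  | t :: ts => (p ++ t) :: ts

-- clean recursive form of Python's split on a single-character separator
def splitChar (d : Char) : List Char → List (List Char)
  | [] => [[]]
  | c :: cs => if c = d then [] :: splitChar d cs else consHead [c] (splitChar d cs)

theorem splitChar_ne_nil (d : Char) (cs : List Char) : splitChar d cs ≠ [] := by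
  induction cs with
  | nil => simp [splitChar]
  | cons c cs ih =>
    simp only [splitChar]
    split
    · simp
    · cases h : splitChar d cs <;> simp [consHead]

theorem go_spec (d : Char) (l : List Char) : ∀ (fuel : Nat), l.length ≤ fuel → ∀ (cur : List Char) (out : List (List Char)),
    PySem.Chars.splitOn.go [d] fuel l cur out = out.reverse ++ consHead cur.reverse (splitChar d l) := by
  induction l with
  | nil =>
    intro fuel _ cur out
    cases fuel <;> simp [PySem.Chars.splitOn.go, splitChar, consHead]
  | cons c rest ih =>
    intro fuel hf cur out
    cases fuel with
    | zero => simp at hf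
    | succ f =>
      simp only [PySem.Chars.splitOn.go, List.isPrefixOf]
      by_cases hcd : c = d
      · subst hcd
        rw [if_pos (by simp)]
        simp only [List.length_cons, List.length_nil, List.drop_succ_cons, List.drop_zero]
        rw [ih f (by simpa using Nat.le_of_succ_le_succ (by simpa using hf)) [] (cur.reverse :: out)]
        obtain ⟨t, ts, ht⟩ : ∃ t ts, splitChar c rest = t :: ts := by
          cases hx : splitChar c rest with
          | nil => exact absurd hx (splitChar_ne_nil c rest)
          | cons t ts => exact ⟨t, ts, rfl⟩
        have hsc : splitChar c (c :: rest) = [] :: splitChar c rest := by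
          show (if c = c then [] :: splitChar c rest else consHead [c] (splitChar c rest)) = _
          rw [if_pos rfl]
        rw [hsc, ht]
        simp [consHead]
      · rw [if_neg (by simp [Ne.symm hcd])]
        rw [ih f (by simpa using Nat.le_of_succ_le_succ (by simpa using hf)) (c :: cur) out]
        simp only [splitChar, if_neg hcd, List.reverse_cons]
        obtain ⟨t, ts, h⟩ : ∃ t ts, splitChar d rest = t :: ts := by
          cases h : splitChar d rest with
          | nil => exact absurd h (splitChar_ne_nil d rest)
          | cons t ts => exact ⟨t, ts, rfl⟩
        simp [h, consHead]

theorem splitOn_eq_splitChar (d : Char) (cs : List Char) :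
    PySem.Chars.splitOn cs [d] = splitChar d cs := by
  show PySem.Chars.splitOn.go [d] (cs.length + 1) cs [] [] = _
  rw [go_spec d cs (cs.length + 1) (by omega) [] []]
  obtain ⟨t, ts, h⟩ : ∃ t ts, splitChar d cs = t :: ts := by
    cases h : splitChar d cs with
    | nil => exact absurd h (splitChar_ne_nil d cs)
    | cons t ts => exact ⟨t, ts, rfl⟩
  simp [h, consHead]

-- the flattened three-way split
def pvSplit3 (cs : List Char) : List (List Char) :=
  ((splitChar '(' cs).flatMap (fun t => splitChar ',' t)).flatMap (fun t => splitChar '_' t)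

theorem pvSplit3_ne_nil (cs : List Char) : pvSplit3 cs ≠ [] := by
  unfold pvSplit3
  obtain ⟨t, ts, h⟩ : ∃ t ts, splitChar '(' cs = t :: ts := by
    cases h : splitChar '(' cs with
    | nil => exact absurd h (splitChar_ne_nil _ cs)
    | cons t ts => exact ⟨t, ts, rfl⟩
  obtain ⟨u, us, hu⟩ : ∃ u us, splitChar ',' t = u :: us := by
    cases h2 : splitChar ',' t with
    | nil => exact absurd h2 (splitChar_ne_nil _ t)
    | cons u us => exact ⟨u, us, rfl⟩
  obtain ⟨v, vs, hv⟩ : ∃ v vs, splitChar '_' u = v :: vs := by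
    cases h3 : splitChar '_' u with
    | nil => exact absurd h3 (splitChar_ne_nil _ u)
    | cons v vs => exact ⟨v, vs, rfl⟩
  simp [h, hu, hv]

theorem consHead_flatMap_splitChar (d c : Char) (hcd : c ≠ d) (L : List (List Char)) (hL : L ≠ []) :
    (consHead [c] L).flatMap (fun t => splitChar d t) = consHead [c] (L.flatMap (fun t => splitChar d t)) := by
  cases L with
  | nil => exact absurd rfl hL
  | cons t ts =>
    obtain ⟨u, us, hu⟩ : ∃ u us, splitChar d t = u :: us := by
      cases h2 : splitChar d t with
      | nil => exact absurd h2 (splitChar_ne_nil _ t)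
      | cons u us => exact ⟨u, us, rfl⟩
    simp [consHead, splitChar, hcd, hu]

theorem pvSplit3_cons_delim (c : Char) (h : c = '(' ∨ c = ',' ∨ c = '_') (cs : List Char) :
    pvSplit3 (c :: cs) = [] :: pvSplit3 cs := by
  unfold pvSplit3
  obtain ⟨t, ts, ht⟩ : ∃ t ts, splitChar '(' cs = t :: ts := by
    cases h1 : splitChar '(' cs with
    | nil => exact absurd h1 (splitChar_ne_nil _ cs)
    | cons t ts => exact ⟨t, ts, rfl⟩
  obtain ⟨u, us, hu⟩ : ∃ u us, splitChar ',' t = u :: us := by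
    cases h2 : splitChar ',' t with
    | nil => exact absurd h2 (splitChar_ne_nil _ t)
    | cons u us => exact ⟨u, us, rfl⟩
  rcases h with h | h | h <;> subst h
  · simp [splitChar, ht, hu]
  · simp [splitChar, consHead, ht, hu]
  · obtain ⟨v, vs, hv⟩ : ∃ v vs, splitChar '_' u = v :: vs := by
      cases h3 : splitChar '_' u with
      | nil => exact absurd h3 (splitChar_ne_nil _ u)
      | cons v vs => exact ⟨v, vs, rfl⟩
    simp [splitChar, consHead, ht, hu, hv]

theorem pvSplit3_cons_plain (c : Char) (h : ¬ (c = '(' ∨ c = ',' ∨ c = '_')) (cs : List Char) :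
    pvSplit3 (c :: cs) = consHead [c] (pvSplit3 cs) := by
  obtain ⟨h1, h2, h3⟩ : ¬ c = '(' ∧ ¬ c = ',' ∧ ¬ c = '_' := by tauto
  unfold pvSplit3
  rw [show splitChar '(' (c :: cs) = consHead [c] (splitChar '(' cs) by simp [splitChar, h1]]
  rw [consHead_flatMap_splitChar ',' c h2 _ (splitChar_ne_nil _ cs)]
  rw [consHead_flatMap_splitChar '_' c h3 _ (by
    obtain ⟨t, ts, ht⟩ : ∃ t ts, splitChar '(' cs = t :: ts := by
      cases hx : splitChar '(' cs with
      | nil => exact absurd hx (splitChar_ne_nil _ cs)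
      | cons t ts => exact ⟨t, ts, rfl⟩
    obtain ⟨u, us, hu⟩ : ∃ u us, splitChar ',' t = u :: us := by
      cases hx : splitChar ',' t with
      | nil => exact absurd hx (splitChar_ne_nil _ t)
      | cons u us => exact ⟨u, us, rfl⟩
    simp [ht, hu])]

theorem consHead_consHead (p q : List Char) (L : List (List Char)) :
    consHead p (consHead q L) = consHead (p ++ q) L := by
  cases L <;> simp [consHead]

theorem pvScan_eq (cs : List Char) : ∀ buf, pvScan buf cs = consHead buf (pvSplit3 cs) := by
  induction cs with
  | nil => intro buf; simp [pvScan, pvSplit3, splitChar, consHead]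
  | cons c cs ih =>
    intro buf
    by_cases h : c = '(' ∨ c = ',' ∨ c = '_'
    · rw [show pvScan buf (c :: cs) = buf :: pvScan [] cs by simp [pvScan, h]]
      rw [ih [], pvSplit3_cons_delim c h cs]
      obtain ⟨t, ts, ht⟩ : ∃ t ts, pvSplit3 cs = t :: ts := by
        cases hx : pvSplit3 cs with
        | nil => exact absurd hx (pvSplit3_ne_nil cs)
        | cons t ts => exact ⟨t, ts, rfl⟩
      simp [ht, consHead]
    · rw [show pvScan buf (c :: cs) = pvScan (buf ++ [c]) cs by simp [pvScan, h]]
      rw [ih (buf ++ [c]), pvSplit3_cons_plain c h cs, consHead_consHead]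

-- ===== VERDICT (by name: the statement is the Claim_ definition above) =====
theorem tokenize_aggressive_spec : Claim_equal_tokenize_aggressive := by
  intro symbol _
  unfold Spec_tokenize_aggressive tokenize_aggressive tokenize_aggressive_alt
  rw [pvScan_eq symbol.toList []]
  have hch : consHead [] (pvSplit3 symbol.toList) = pvSplit3 symbol.toList := by
    obtain ⟨t, ts, ht⟩ : ∃ t ts, pvSplit3 symbol.toList = t :: ts := by
      cases hx : pvSplit3 symbol.toList with
      | nil => exact absurd hx (pvSplit3_ne_nil _)
      | cons t ts => exact ⟨t, ts, rfl⟩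
    rw [ht]; simp [consHead]
  rw [hch]
  simp only [PySem.List.foldl_append_singleton_eq_map, PySem.List.foldl_append_eq_flatMap,
    splitOn_eq_splitChar, List.nil_append]
  unfold pvSplit3
  simp [List.flatMap_map, List.map_flatMap, List.flatMap_assoc]
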